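-- pv_equiv track=rewrite | github.com/MFlowCode/MFC | toolchain/mfc/params/ast_analyzer.py | compute_method_stages
-- ===== SOURCE A (Python) =====
-- from typing import Dict, List, Optional, Set
-- from collections import defaultdict
--
-- STAGE_ROOTS: Dict[str, List[str]] = {
--     "common": ["validate_common"],
--     "simulation": ["validate_simulation"],
--     "pre_process": ["validate_pre_process"],
--     "post_process": ["validate_post_process"],
-- }
--
-- def compute_method_stages(call_graph: Dict[str, Set[str]]) -> Dict[str, Set[str]]:
--     """
--     For each stage (simulation/pre_process/post_process/common), starting from
--     validate_* roots, walk the call graph and record which methods belong to which stages.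
--     """
--     method_stages: Dict[str, Set[str]] = defaultdict(set)
--
--     def dfs(start: str, stage: str):
--         stack = [start]
--         visited: Set[str] = set()
--         while stack:
--             m = stack.pop()
--             if m in visited:
--                 continue
--             visited.add(m)
--             method_stages[m].add(stage)
--             for nxt in call_graph.get(m, ()):
--                 if nxt not in visited:
--                     stack.append(nxt)
--
--     for stage, roots in STAGE_ROOTS.items():
--         for root in roots:
--             dfs(root, stage)
--
--     return method_stages
-- ===== SOURCE B (Python) =====
-- from typing import Dict, List, Set
-- from collections import defaultdict
--
-- STAGE_ROOTS: Dict[str, List[str]] = {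
--     "common": ["validate_common"],
--     "simulation": ["validate_simulation"],
--     "pre_process": ["validate_pre_process"],
--     "post_process": ["validate_post_process"],
-- }
--
--
-- def compute_method_stages(call_graph: Dict[str, Set[str]]) -> Dict[str, Set[str]]:
--     """Recursive-DFS reformulation: a visit() helper replaces the explicit stack.
--
--     Neighbours are taken in reverse order so the traversal (hence the dict's
--     key insertion order) is identical to the iterative stack version.
--     """
--     method_stages: Dict[str, Set[str]] = defaultdict(set)
--
--     def visit(m: str, stage: str, visited: Set[str]) -> None:
--         if m in visited:
--             return
--         visited.add(m)
--         method_stages[m].add(stage)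
--         for nxt in reversed(list(call_graph.get(m, ()))):
--             visit(nxt, stage, visited)
--
--     for stage, roots in STAGE_ROOTS.items():
--         for root in roots:
--             visit(root, stage, set())
--
--     return method_stages
-- ===== Notes on version B (the rewrite author's own statement) =====
-- stated objective: alternative
-- what changed: The explicit-stack iterative DFS (while stack: pop, mark, push unvisited neighbours) is replaced by a recursive visit(node, stage, visited) helper that marks the node and recurses into its neighbours in reverse order, which provably yields the identical traversal and output.
import Mathlib
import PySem

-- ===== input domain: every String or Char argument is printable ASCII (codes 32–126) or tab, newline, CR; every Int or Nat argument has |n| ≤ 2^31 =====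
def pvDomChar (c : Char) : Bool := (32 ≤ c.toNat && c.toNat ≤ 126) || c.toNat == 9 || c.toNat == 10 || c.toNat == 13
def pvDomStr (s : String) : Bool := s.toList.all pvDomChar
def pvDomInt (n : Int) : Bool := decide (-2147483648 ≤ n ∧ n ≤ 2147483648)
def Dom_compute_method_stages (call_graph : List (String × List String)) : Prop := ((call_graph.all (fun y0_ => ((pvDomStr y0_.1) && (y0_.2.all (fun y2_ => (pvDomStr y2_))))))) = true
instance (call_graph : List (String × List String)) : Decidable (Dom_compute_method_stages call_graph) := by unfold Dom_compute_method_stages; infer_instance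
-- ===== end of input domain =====

-- B replaces A's explicit-stack iterative DFS by a recursive visit helper (processing neighbours
-- in reverse order, which provably yields the same traversal); same cost, different decomposition.

-- ===== PORT A =====
-- module-level constant STAGE_ROOTS (shared by both ports, as in the Python module)
def STAGE_ROOTS : List (String × List String) :=
  [("common", ["validate_common"]),
   ("simulation", ["validate_simulation"]),
   ("pre_process", ["validate_pre_process"]),
   ("post_process", ["validate_post_process"])]

-- termination-measure helper for the while-stack loop (proof device only; cited by decreasing_by)
def pendingA (g : List (String × List String)) (v : List String) : Nat :=
  match g with
  | [] => 0
  | (k, vs) :: g' => (if k ∈ v then 0 else vs.length) + pendingA g' v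

theorem pendingA_add_le (g : List (String × List String)) (v : List String) (m : String) :
    pendingA g (PySem.Set.add v m) ≤ pendingA g v := by
  induction g with
  | nil => simp [pendingA]
  | cons p g' ih =>
    obtain ⟨k, vs⟩ := p
    simp only [pendingA]
    by_cases hk : k ∈ v
    · have : k ∈ PySem.Set.add v m := by rw [PySem.Set.mem_add]; exact Or.inl hk
      simp [hk, this]; omega
    · by_cases hk' : k ∈ PySem.Set.add v m <;> simp [hk, hk'] <;> omega

theorem pendingA_add_getD (g : List (String × List String)) (v : List String) (m : String)
    (h : m ∉ v) :
    pendingA g (PySem.Set.add v m) + ((PySem.Dict.mk g).getD m []).length ≤ pendingA g v := by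
  induction g with
  | nil => simp [pendingA]; rfl
  | cons p g' ih =>
    obtain ⟨k, vs⟩ := p
    rw [PySem.Dict.getD_eq_get?_getD, PySem.Dict.get?_mk_cons]
    by_cases hk : k = m
    · subst hk
      have hmem : k ∈ PySem.Set.add v k := by rw [PySem.Set.mem_add]; exact Or.inr rfl
      simp only [pendingA, if_pos hmem, if_neg h, beq_self_eq_true, if_pos, Option.getD_some]
      have := pendingA_add_le g' v k
      omega
    · have hbeq : (k == m) = false := by simp [hk]
      rw [hbeq]
      simp only [pendingA, Bool.false_eq_true, if_false]
      rw [← PySem.Dict.getD_eq_get?_getD]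
      have hkv : k ∈ PySem.Set.add v m ↔ k ∈ v := by
        rw [PySem.Set.mem_add]
        constructor
        · rintro (h1 | h1)
          · exact h1
          · exact absurd h1 hk
        · exact Or.inl
      by_cases hk2 : k ∈ v
      · simp only [if_pos hk2, if_pos (hkv.mpr hk2)]; omega
      · have hnk : k ∉ PySem.Set.add v m := fun hc => hk2 (hkv.mp hc)
        simp only [if_neg hk2, if_neg hnk]; omega

def dfsA (g : List (String × List String)) (stage : String)
    (stack : List String) (visited : PySem.Set String)
    (ms : PySem.Dict String (PySem.Set String)) :
    PySem.Set String × PySem.Dict String (PySem.Set String) :=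
  match h : PySem.List.pop? stack with
  | none => (visited, ms)
  | some (m, rest) =>
    if m ∈ visited then
      dfsA g stage rest visited ms
    else
      let visited' := PySem.Set.add visited m
      let ms' := PySem.Dict.modify ms m PySem.Set.empty (fun s => PySem.Set.add s stage)
      dfsA g stage
        (rest ++ ((PySem.Dict.mk g).getD m []).filter (fun n => !decide (n ∈ visited')))
        visited' ms'
termination_by stack.length + pendingA g visited
decreasing_by
  · have h1 := PySem.List.length_of_pop?_eq_some _ h
    simp at h1
    omega
  · have h1 := PySem.List.length_of_pop?_eq_some _ h
    simp at h1
    have h2 := pendingA_add_getD g visited m (by assumption)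
    have h3 := List.length_filter_le (fun n => !decide (n ∈ PySem.Set.add visited m))
      ((PySem.Dict.mk g).getD m [])
    simp only [List.length_append]
    omega

def compute_method_stages (call_graph : List (String × List String)) : List (String × List String) :=
  (STAGE_ROOTS.foldl (fun ms sr =>
      sr.2.foldl (fun ms root => (dfsA call_graph sr.1 [root] PySem.Set.empty ms).2) ms)
    PySem.Dict.empty).items

-- ===== PORT B =====
-- recursive visit(m, stage, visited); fuel only bounds the recursion depth for Lean's
-- termination checker and is proved never to run out (visitB_eq_dfsA)
def visitB (g : List (String × List String)) (stage : String) :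
    Nat → String → PySem.Set String × PySem.Dict String (PySem.Set String) →
    PySem.Set String × PySem.Dict String (PySem.Set String)
  | 0, _, s => s
  | fuel + 1, m, (visited, ms) =>
    if m ∈ visited then (visited, ms)
    else
      let visited' := PySem.Set.add visited m
      let ms' := PySem.Dict.modify ms m PySem.Set.empty (fun s => PySem.Set.add s stage)
      (((PySem.Dict.mk g).getD m []).reverse).foldl
        (fun s n => visitB g stage fuel n s) (visited', ms')

def compute_method_stages_alt (call_graph : List (String × List String)) : List (String × List String) :=
  let fuel := (call_graph.map (fun p => p.2.length)).sum + 1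
  (STAGE_ROOTS.foldl (fun ms sr =>
      sr.2.foldl (fun ms root => (visitB call_graph sr.1 fuel root (PySem.Set.empty, ms)).2) ms)
    PySem.Dict.empty).items

-- ===== PRECONDITION & SPEC =====
def Spec_compute_method_stages (call_graph : List (String × List String)) (out : List (String × List String)) : Prop := out = compute_method_stages_alt call_graph
instance (call_graph : List (String × List String)) (out : List (String × List String)) : Decidable (Spec_compute_method_stages call_graph out) := by unfold Spec_compute_method_stages; infer_instance

-- ===== CLAIM (what is proved, stated in full; the proofs are below) =====
def Claim_equal_compute_method_stages : Prop := ∀ (call_graph : List (String × List String)), Dom_compute_method_stages call_graph → Spec_compute_method_stages call_graph (compute_method_stages call_graph)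

-- ===== LEMMAS AND PROOFS =====

theorem dfsA_nil (g : List (String × List String)) (stage : String)
    (v : PySem.Set String) (ms : PySem.Dict String (PySem.Set String)) :
    dfsA g stage [] v ms = (v, ms) := by
  rw [dfsA]; simp [PySem.List.pop?, PySem.List.pyIdx?]

theorem dfsA_concat (g : List (String × List String)) (stage : String) (l : List String)
    (m : String) (v : PySem.Set String) (ms : PySem.Dict String (PySem.Set String)) :
    dfsA g stage (l ++ [m]) v ms =
      if m ∈ v then dfsA g stage l v ms
      else
        dfsA g stage
          (l ++ ((PySem.Dict.mk g).getD m []).filter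
            (fun n => !decide (n ∈ PySem.Set.add v m)))
          (PySem.Set.add v m)
          (PySem.Dict.modify ms m PySem.Set.empty (fun s => PySem.Set.add s stage)) := by
  conv_lhs => rw [dfsA]
  split
  · next heq =>
    rw [PySem.List.pop?_last] at heq
    exact absurd heq (by simp)
  · next m1 rest heq =>
    rw [PySem.List.pop?_last] at heq
    simp only [Option.some.injEq, Prod.mk.injEq] at heq
    obtain ⟨rfl, rfl⟩ := heq
    rfl

theorem dfsA_one (g : List (String × List String)) (stage : String)
    (m : String) (v : PySem.Set String) (ms : PySem.Dict String (PySem.Set String)) :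
    dfsA g stage [m] v ms =
      if m ∈ v then (v, ms)
      else
        dfsA g stage
          (((PySem.Dict.mk g).getD m []).filter
            (fun n => !decide (n ∈ PySem.Set.add v m)))
          (PySem.Set.add v m)
          (PySem.Dict.modify ms m PySem.Set.empty (fun s => PySem.Set.add s stage)) := by
  have := dfsA_concat g stage [] m v ms
  simpa [dfsA_nil] using this

theorem dfsA_inv (g : List (String × List String)) (stage : String) :
    ∀ (N : Nat) (l : List String) (v : PySem.Set String)
      (ms : PySem.Dict String (PySem.Set String)),
      l.length + pendingA g v ≤ N →
      v ⊆ (dfsA g stage l v ms).1 ∧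
        pendingA g (dfsA g stage l v ms).1 ≤ pendingA g v := by
  intro N
  induction N with
  | zero =>
    intro l v ms hle
    have hl : l = [] := List.eq_nil_of_length_eq_zero (by omega)
    subst hl
    rw [dfsA_nil]
    exact ⟨fun _ h => h, le_rfl⟩
  | succ N ih =>
    intro l v ms hle
    rcases List.eq_nil_or_concat l with rfl | ⟨l', m, rfl⟩
    · rw [dfsA_nil]
      exact ⟨fun _ h => h, le_rfl⟩
    · simp only [List.concat_eq_append] at hle ⊢
      rw [dfsA_concat]
      by_cases hm : m ∈ v
      · rw [if_pos hm]
        apply ih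
        simp only [List.length_append, List.length_cons, List.length_nil] at hle ⊢
        omega
      · rw [if_neg hm]
        have h2 := pendingA_add_getD g v m hm
        have h3 := List.length_filter_le (fun n => !decide (n ∈ PySem.Set.add v m))
          ((PySem.Dict.mk g).getD m [])
        have hrec := ih (l' ++ ((PySem.Dict.mk g).getD m []).filter
            (fun n => !decide (n ∈ PySem.Set.add v m)))
          (PySem.Set.add v m)
          (PySem.Dict.modify ms m PySem.Set.empty (fun s => PySem.Set.add s stage))
          (by simp only [List.length_append, List.length_cons, List.length_nil] at hle ⊢; omega)
        refine ⟨?_, ?_⟩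
        · intro x hx
          exact hrec.1 (by rw [PySem.Set.mem_add]; exact Or.inl hx)
        · exact le_trans hrec.2 (pendingA_add_le g v m)

theorem dfsA_append (g : List (String × List String)) (stage : String) :
    ∀ (N : Nat) (l2 l1 : List String) (v : PySem.Set String)
      (ms : PySem.Dict String (PySem.Set String)),
      l2.length + pendingA g v ≤ N →
      dfsA g stage (l1 ++ l2) v ms =
        dfsA g stage l1 (dfsA g stage l2 v ms).1 (dfsA g stage l2 v ms).2 := by
  intro N
  induction N with
  | zero =>
    intro l2 l1 v ms hle
    have hl : l2 = [] := List.eq_nil_of_length_eq_zero (by omega)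
    subst hl
    simp [dfsA_nil]
  | succ N ih =>
    intro l2 l1 v ms hle
    rcases List.eq_nil_or_concat l2 with rfl | ⟨l2', m, rfl⟩
    · simp [dfsA_nil]
    · simp only [List.concat_eq_append] at hle ⊢
      rw [← List.append_assoc]
      rw [dfsA_concat, dfsA_concat]
      by_cases hm : m ∈ v
      · rw [if_pos hm, if_pos hm]
        apply ih
        simp only [List.length_append, List.length_cons, List.length_nil] at hle
        omega
      · rw [if_neg hm, if_neg hm]
        rw [List.append_assoc]
        apply ih
        have h2 := pendingA_add_getD g v m hm
        have h3 := List.length_filter_le (fun n => !decide (n ∈ PySem.Set.add v m))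
          ((PySem.Dict.mk g).getD m [])
        simp only [List.length_append, List.length_cons, List.length_nil] at hle ⊢
        omega

theorem dfsA_eq_foldl (g : List (String × List String)) (stage : String)
    (l : List String) (v : PySem.Set String) (ms : PySem.Dict String (PySem.Set String)) :
    dfsA g stage l v ms =
      l.reverse.foldl (fun s n => dfsA g stage [n] s.1 s.2) (v, ms) := by
  induction l generalizing v ms with
  | nil => simp [dfsA_nil]
  | cons a l ih =>
    have hsplit := dfsA_append g stage (l.length + pendingA g v) l [a] v ms le_rfl
    simp only [List.reverse_cons, List.foldl_append, List.foldl_cons, List.foldl_nil]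
    rw [show a :: l = [a] ++ l from rfl, hsplit, ih]

theorem foldl_dfsA_filter (g : List (String × List String)) (stage : String) (w : List String) :
    ∀ (l : List String) (v : PySem.Set String) (ms : PySem.Dict String (PySem.Set String)),
      w ⊆ v →
      (l.filter (fun n => !decide (n ∈ w))).foldl
        (fun s n => dfsA g stage [n] s.1 s.2) (v, ms) =
      l.foldl (fun s n => dfsA g stage [n] s.1 s.2) (v, ms) := by
  intro l
  induction l with
  | nil => intros; rfl
  | cons n l ih =>
    intro v ms hw
    by_cases hn : n ∈ w
    · have hnv : n ∈ v := hw hn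
      rw [List.filter_cons_of_neg (by simp [hn])]
      rw [List.foldl_cons]
      rw [dfsA_one, if_pos hnv]
      exact ih v ms hw
    · rw [List.filter_cons_of_pos (by simp [hn])]
      simp only [List.foldl_cons]
      have hmono := (dfsA_inv g stage (1 + pendingA g v) [n] v ms (by simp)).1
      have hw' : w ⊆ (dfsA g stage [n] v ms).1 := fun x hx => hmono (hw hx)
      have := ih (dfsA g stage [n] v ms).1 (dfsA g stage [n] v ms).2 hw'
      exact this

theorem visitB_eq_dfsA (g : List (String × List String)) (stage : String) :
    ∀ (fuel : Nat) (v : PySem.Set String) (ms : PySem.Dict String (PySem.Set String))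
      (m : String), pendingA g v < fuel →
      visitB g stage fuel m (v, ms) = dfsA g stage [m] v ms := by
  intro fuel
  induction fuel with
  | zero => intro v ms m h; omega
  | succ f ih =>
    intro v ms m h
    rw [dfsA_one]
    rw [visitB]
    by_cases hm : m ∈ v
    · rw [if_pos hm, if_pos hm]
    · rw [if_neg hm, if_neg hm]
      by_cases hns : (PySem.Dict.mk g).getD m [] = []
      · rw [hns]
        simp [dfsA_nil]
      · have hlen : 1 ≤ ((PySem.Dict.mk g).getD m []).length := by
          cases hx : (PySem.Dict.mk g).getD m [] with
          | nil => exact absurd hx hns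
          | cons a as => simp
        have h2 := pendingA_add_getD g v m hm
        have hf : pendingA g (PySem.Set.add v m) < f := by omega
        have aux : ∀ (l : List String) (v₀ : PySem.Set String)
            (ms₀ : PySem.Dict String (PySem.Set String)), pendingA g v₀ < f →
            l.foldl (fun s n => visitB g stage f n s) (v₀, ms₀) =
            l.foldl (fun s n => dfsA g stage [n] s.1 s.2) (v₀, ms₀) := by
          intro l
          induction l with
          | nil => intros; rfl
          | cons n l ihl =>
            intro v₀ ms₀ hv
            simp only [List.foldl_cons]
            rw [ih v₀ ms₀ n hv]
            have hst := (dfsA_inv g stage (1 + pendingA g v₀) [n] v₀ ms₀ (by simp)).2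
            exact ihl (dfsA g stage [n] v₀ ms₀).1 (dfsA g stage [n] v₀ ms₀).2
              (lt_of_le_of_lt hst hv)
        rw [dfsA_eq_foldl, ← List.filter_reverse]
        rw [foldl_dfsA_filter g stage (PySem.Set.add v m)
          (((PySem.Dict.mk g).getD m []).reverse) (PySem.Set.add v m)
          (PySem.Dict.modify ms m PySem.Set.empty (fun s => PySem.Set.add s stage))
          (fun _ hx => hx)]
        exact aux (((PySem.Dict.mk g).getD m []).reverse) (PySem.Set.add v m)
          (PySem.Dict.modify ms m PySem.Set.empty (fun s => PySem.Set.add s stage)) hf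

theorem pendingA_nil (g : List (String × List String)) :
    pendingA g [] = (g.map (fun p => p.2.length)).sum := by
  induction g with
  | nil => simp [pendingA]
  | cons p g' ih => obtain ⟨k, vs⟩ := p; simp [pendingA, ih]

-- ===== VERDICT (by name: the statement is the Claim_ definition above) =====
theorem compute_method_stages_spec : Claim_equal_compute_method_stages := by
  intro g _
  unfold Spec_compute_method_stages compute_method_stages compute_method_stages_alt
  have hfuel : pendingA g [] < (g.map (fun p => p.2.length)).sum + 1 := by
    rw [pendingA_nil]; omega
  have hM : ∀ (stage root : String) (ms : PySem.Dict String (PySem.Set String)),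
      visitB g stage ((g.map (fun p => p.2.length)).sum + 1) root (PySem.Set.empty, ms)
        = dfsA g stage [root] PySem.Set.empty ms := by
    intro stage root ms
    exact visitB_eq_dfsA g stage _ _ ms root hfuel
  simp only [STAGE_ROOTS, List.foldl, hM]
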